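-- pv_equiv track=rewrite | github.com/piotrhelm/NESTFUL | data_v2/executable_functions/py_code_file_2629.py | histogram_distance
-- ===== SOURCE A (Python) =====
-- from collections import Counter
-- from typing import List
--
-- def histogram_distance(list1: List[int], list2: List[int]) -> int:
--
--     """Calculates the histogram distance between two lists.
--
--     The histogram distance is computed as the sum of the absolute differences between the frequencies of each element in the two lists.
--
--     Args:
--
--         list1: The first list.
--
--         list2: The second list.
--
--     """
--
--     freq1 = Counter(list1)
--
--     freq2 = Counter(list2)
--
--     combined_elements = set(list1) | set(list2)  # Combine unique elements from both lists
--
--     dist = 0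
--
--     for elem in combined_elements:
--
--         dist += abs(freq1[elem] - freq2[elem])
--
--     return dist
-- ===== SOURCE B (Python) =====
-- from typing import List
--
-- def histogram_distance(list1: List[int], list2: List[int]) -> int:
--     # No counting at all: cancel matching occurrences of list1 out of a working
--     # copy of list2; unmatched elements of list1 plus leftovers of list2 are the distance.
--     leftover = list(list2)
--     unmatched = 0
--     for x in list1:
--         if x in leftover:
--             leftover.remove(x)
--         else:
--             unmatched += 1
--     return unmatched + len(leftover)
-- ===== Notes on version B (the rewrite author's own statement) =====
-- stated objective: alternative
-- what changed: No frequency counting at all: B cancels matching occurrences of list1 out of a working copy of list2 (list.remove), returning the number of unmatched list1 elements plus the leftovers of list2; the distance equals sum(|c1-c2|) because each side's surplus is exactly what fails to match.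
import Mathlib
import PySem

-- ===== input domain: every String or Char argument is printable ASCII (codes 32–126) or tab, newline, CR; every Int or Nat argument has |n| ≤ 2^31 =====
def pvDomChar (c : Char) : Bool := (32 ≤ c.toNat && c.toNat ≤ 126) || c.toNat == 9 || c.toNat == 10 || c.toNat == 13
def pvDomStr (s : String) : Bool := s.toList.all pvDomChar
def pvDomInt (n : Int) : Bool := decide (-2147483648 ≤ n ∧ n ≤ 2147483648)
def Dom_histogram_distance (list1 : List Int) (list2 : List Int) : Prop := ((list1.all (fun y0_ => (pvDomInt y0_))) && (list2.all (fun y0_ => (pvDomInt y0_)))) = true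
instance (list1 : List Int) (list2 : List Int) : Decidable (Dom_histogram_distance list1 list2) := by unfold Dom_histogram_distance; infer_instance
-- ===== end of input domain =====

-- B replaces counting entirely by multiset matching (cancel list1's elements out of a copy of list2); alternative algorithm, same return value.

-- ===== PORT A =====
-- A: freq1/freq2 = Counter; loop over set(list1) | set(list2) accumulating |freq1[e] - freq2[e]|
-- (A's iteration over the set is a commutative sum, so the Set's list order is immaterial.)
def histogram_distance (list1 : List Int) (list2 : List Int) : Int :=
  let freq1 := PySem.Dict.counter list1
  let freq2 := PySem.Dict.counter list2
  let combined_elements := PySem.Set.union (PySem.Set.ofList list1) (PySem.Set.ofList list2)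
  combined_elements.foldl (fun dist elem => dist + |freq1.getD elem 0 - freq2.getD elem 0|) 0

-- ===== PORT B =====
-- B: leftover = list(list2); for x in list1: remove first occurrence of x from leftover if present,
-- else count x unmatched; answer = unmatched + len(leftover). (list.remove = List.erase: first occurrence.)
def histogram_distance_alt (list1 : List Int) (list2 : List Int) : Int :=
  let st := list1.foldl (fun (st : Int × List Int) x =>
      if x ∈ st.2 then (st.1, st.2.erase x) else (st.1 + 1, st.2)) (0, list2)
  st.1 + (st.2.length : Int)

-- ===== PRECONDITION & SPEC =====
def Spec_histogram_distance (list1 : List Int) (list2 : List Int) (out : Int) : Prop := out = histogram_distance_alt list1 list2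
instance (list1 : List Int) (list2 : List Int) (out : Int) : Decidable (Spec_histogram_distance list1 list2 out) := by unfold Spec_histogram_distance; infer_instance

-- ===== CLAIM (what is proved, stated in full; the proofs are below) =====
def Claim_equal_histogram_distance : Prop := ∀ (list1 : List Int) (list2 : List Int), Dom_histogram_distance list1 list2 → Spec_histogram_distance list1 list2 (histogram_distance list1 list2)

-- ===== LEMMAS AND PROOFS =====

-- canonical order-free value: the sum of absolute count differences over the joint support
def pvS (l1 l2 : List Int) : Int :=
  ∑ k ∈ (l1 ++ l2).toFinset, |(l1.count k : Int) - (l2.count k : Int)|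

-- extend the sum to any superset of the joint support (the summand vanishes outside it)
theorem pvS_eq_sum (l1 l2 : List Int) (s : Finset Int) (h : (l1 ++ l2).toFinset ⊆ s) :
    pvS l1 l2 = ∑ k ∈ s, |(l1.count k : Int) - (l2.count k : Int)| := by
  unfold pvS
  refine Finset.sum_subset h ?_
  intro k _ hk
  simp only [List.mem_toFinset, List.mem_append, not_or] at hk
  rw [List.count_eq_zero_of_not_mem hk.1, List.count_eq_zero_of_not_mem hk.2]
  simp

theorem pvS_nil_left (b : List Int) : pvS [] b = (b.length : Int) := by
  unfold pvS
  have h : ∀ k ∈ ([] ++ b : List Int).toFinset,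
      |(([] : List Int).count k : Int) - (b.count k : Int)| = (b.count k : Int) := by
    intro k _
    simp only [List.count_nil, Nat.cast_zero, zero_sub, abs_neg]
    exact abs_of_nonneg (by positivity)
  rw [Finset.sum_congr rfl h]
  rw [List.nil_append]
  rw [← Nat.cast_sum]
  have hms := Multiset.toFinset_sum_count_eq (b : Multiset Int)
  simp only [Multiset.coe_count, Multiset.coe_card] at hms
  have hts : (b : Multiset Int).toFinset = b.toFinset := rfl
  rw [hts] at hms
  rw [hms]

theorem pvS_cons_mem (x : Int) (l1 b : List Int) (hx : x ∈ b) :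
    pvS (x :: l1) b = pvS l1 (b.erase x) := by
  have hsub1 : ((x :: l1) ++ b).toFinset ⊆ ((x :: l1) ++ b).toFinset := fun _ h => h
  have hsub2 : (l1 ++ b.erase x).toFinset ⊆ ((x :: l1) ++ b).toFinset := by
    intro k hk
    simp only [List.mem_toFinset, List.mem_append, List.mem_cons] at *
    rcases hk with h | h
    · exact Or.inl (Or.inr h)
    · exact Or.inr (List.mem_of_mem_erase h)
  rw [pvS_eq_sum (x :: l1) b _ hsub1, pvS_eq_sum l1 (b.erase x) _ hsub2]
  refine Finset.sum_congr rfl ?_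
  intro k _
  by_cases hk : k = x
  · subst hk
    have hc : 1 ≤ b.count k := List.count_pos_iff.mpr hx
    rw [List.count_cons_self, List.count_erase_self]
    have : ((b.count k - 1 : Nat) : Int) = (b.count k : Int) - 1 := by omega
    rw [this]
    push_cast
    congr 1
    ring
  · simp only [List.count_cons]
    rw [if_neg (fun h => hk (beq_iff_eq.mp h).symm), List.count_erase_of_ne hk, Nat.add_zero]

theorem pvS_cons_not_mem (x : Int) (l1 b : List Int) (hx : x ∉ b) :
    pvS (x :: l1) b = 1 + pvS l1 b := by
  have hmemx : x ∈ ((x :: l1) ++ b).toFinset := by simp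
  have hsub2 : (l1 ++ b).toFinset ⊆ ((x :: l1) ++ b).toFinset := by
    intro k hk
    simp only [List.mem_toFinset, List.mem_append, List.mem_cons] at *
    tauto
  rw [pvS_eq_sum (x :: l1) b _ (fun _ h => h), pvS_eq_sum l1 b _ hsub2]
  rw [← Finset.add_sum_erase _ _ hmemx, ← Finset.add_sum_erase _ _ hmemx]
  have hx0 : b.count x = 0 := List.count_eq_zero_of_not_mem hx
  have hterm : |((x :: l1).count x : Int) - (b.count x : Int)|
      = 1 + |(l1.count x : Int) - (b.count x : Int)| := by
    rw [List.count_cons_self, hx0]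
    push_cast
    simp only [sub_zero]
    rw [abs_of_nonneg (by positivity), abs_of_nonneg (by positivity)]
    ring
  rw [hterm]
  have hrest : ∀ k ∈ (((x :: l1) ++ b).toFinset).erase x,
      |((x :: l1).count k : Int) - (b.count k : Int)| = |(l1.count k : Int) - (b.count k : Int)| := by
    intro k hk
    have hne : k ≠ x := (Finset.mem_erase.mp hk).1
    simp only [List.count_cons]
    rw [if_neg (fun h => hne (beq_iff_eq.mp h).symm), Nat.add_zero]
  rw [Finset.sum_congr rfl hrest]
  ring

-- the matching loop computes pvS: induction on list1, with the two pvS step lemmas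
theorem pv_loop_eq (l1 : List Int) : ∀ (b : List Int) (e : Int),
    (let st := l1.foldl (fun (st : Int × List Int) x =>
        if x ∈ st.2 then (st.1, st.2.erase x) else (st.1 + 1, st.2)) (e, b)
     st.1 + (st.2.length : Int)) = e + pvS l1 b := by
  induction l1 with
  | nil => intro b e; simp [pvS_nil_left]
  | cons x l1 ih =>
    intro b e
    by_cases hx : x ∈ b
    · simp only [List.foldl_cons, hx, if_pos]
      rw [ih (b.erase x) e, pvS_cons_mem x l1 b hx]
    · simp only [List.foldl_cons, hx, if_neg, not_false_iff]
      rw [ih b (e + 1), pvS_cons_not_mem x l1 b hx]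
      ring

-- A's union-set sum equals pvS
theorem pv_A_eq (l1 l2 : List Int) : histogram_distance l1 l2 = pvS l1 l2 := by
  unfold histogram_distance
  dsimp only
  rw [PySem.List.foldl_add, zero_add]
  simp only [PySem.Dict.getD_counter]
  set t := PySem.Set.union (PySem.Set.ofList l1) (PySem.Set.ofList l2) with ht
  have hnd : t.Nodup := PySem.Set.nodup_union _ _ (PySem.Set.nodup_ofList l1)
  have hsum := List.sum_toFinset
    (l := t) (f := fun k => |(l1.count k : Int) - (l2.count k : Int)|) hnd
  rw [← hsum]
  have hset : t.toFinset = (l1 ++ l2).toFinset := by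
    ext k
    simp only [List.mem_toFinset, ht, PySem.Set.mem_union, PySem.Set.mem_ofList,
      List.mem_append]
  rw [hset]
  rfl

-- ===== VERDICT (by name: the statement is the Claim_ definition above) =====
theorem histogram_distance_spec : Claim_equal_histogram_distance := by
  unfold Claim_equal_histogram_distance
  intro l1 l2 _
  unfold Spec_histogram_distance histogram_distance_alt
  rw [pv_A_eq]
  have h := pv_loop_eq l1 l2 0
  simpa using h.symm
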